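-- pv_equiv track=rewrite | github.com/UngemachM/ProgrammingMoritzUngemach | notebooks/TannanbaumV2.py | muster_generator
-- ===== SOURCE A (Python) =====
-- def muster_generator(anzahl):
--     result = []
--     current = 0
--
--     for i in range(anzahl):
--         result.append(current)
--         current += 1
--
--         if i % 2 == 1:
--             current = result[i // 2] + 1
--
--     return result[-1] if result else None
--
--     # Beispielaufruf mit einer Anzahl von 17
--     anzahl = 3
--     letzte_zahl = letzte_zahl_im_muster(anzahl)
--     return letzte_zahl
-- ===== SOURCE B (Python) =====
-- def muster_generator(anzahl):
--     # Closed recurrence evaluated by halving the index: O(log n) instead of O(n).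
--     if anzahl <= 0:
--         return None
--     def f(n):
--         if n == 0:
--             return 0
--         if n == 1:
--             return 1
--         return f(n // 2 - 1) + (1 if n % 2 == 0 else 2)
--     return f(anzahl - 1)
-- ===== Notes on version B (the rewrite author's own statement) =====
-- stated objective: faster
-- what changed: B replaces A's O(n) loop that builds the whole list with a direct recursive evaluation of the recurrence for index n-1 that halves the index each step (no list at all), O(log n).
import Mathlib
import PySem

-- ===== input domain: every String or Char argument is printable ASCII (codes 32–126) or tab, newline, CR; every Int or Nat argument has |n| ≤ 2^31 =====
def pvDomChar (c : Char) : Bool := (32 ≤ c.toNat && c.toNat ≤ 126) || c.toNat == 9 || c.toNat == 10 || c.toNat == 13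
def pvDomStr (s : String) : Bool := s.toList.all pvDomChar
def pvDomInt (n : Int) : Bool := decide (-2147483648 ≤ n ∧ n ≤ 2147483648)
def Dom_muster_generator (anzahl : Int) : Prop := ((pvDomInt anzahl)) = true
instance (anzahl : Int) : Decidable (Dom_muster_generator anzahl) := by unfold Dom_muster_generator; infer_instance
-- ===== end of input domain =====

-- B replaces A's linear loop (which builds the whole list) by a direct recursive evaluation
-- of the recurrence at index anzahl-1 that halves the index each step.


-- ===== PORT A =====
-- the loop body; result[i // 2] is always in range (0 ≤ i//2 < len(result)), so pyGetD with default 0 is exact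
def musterStepA (st : List Int × Int) (i : Int) : List Int × Int :=
  let result := st.1 ++ [st.2]
  let current := st.2 + 1
  let current := if PySem.Int.mod i 2 == 1
                 then PySem.List.pyGetD result (PySem.Int.floordiv i 2) 0 + 1
                 else current
  (result, current)

def muster_generator (anzahl : Int) : Option Int :=
  let st := (PySem.List.pyRange 0 anzahl 1).foldl musterStepA ([], 0)
  if st.1 = [] then none else PySem.List.pyGet? st.1 (-1)

-- ===== PORT B =====
-- Source B's inner helper f, on the nonnegative index n = anzahl-1
def musterF : Nat → Int
  | 0 => 0
  | 1 => 1
  | (n+2) => musterF ((n+2)/2 - 1) + (if (n+2) % 2 == 0 then 1 else 2)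
decreasing_by omega

def muster_generator_alt (anzahl : Int) : Option Int :=
  if anzahl ≤ 0 then none else some (musterF (anzahl - 1).toNat)

-- ===== PRECONDITION & SPEC =====
def Spec_muster_generator (anzahl : Int) (out : Option Int) : Prop := out = muster_generator_alt anzahl
instance (anzahl : Int) (out : Option Int) : Decidable (Spec_muster_generator anzahl out) := by unfold Spec_muster_generator; infer_instance

-- ===== CLAIM (what is proved, stated in full; the proofs are below) =====
def Claim_equal_muster_generator : Prop := ∀ (anzahl : Int), Dom_muster_generator anzahl → Spec_muster_generator anzahl (muster_generator anzahl)

-- ===== LEMMAS AND PROOFS =====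

lemma musterF_succ_even (n : Nat) (h : n % 2 = 0) : musterF (n+1) = musterF n + 1 := by
  match n, h with
  | 0, _ => simp [musterF]
  | (m+2), h =>
    rw [show m+2+1 = (m+1)+2 by ring, musterF, musterF]
    have h1 : (m+1+2)/2 - 1 = (m+2)/2 - 1 := by omega
    have h2 : ((m+1+2) % 2 == 0) = false := by simp; omega
    have h3 : ((m+2) % 2 == 0) = true := by simp; omega
    rw [h1, h2, h3]; simp; ring

lemma musterF_succ_odd (n : Nat) (h : n % 2 = 1) : musterF (n+1) = musterF (n/2) + 1 := by
  match n, h with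
  | 1, _ => simp [musterF]
  | (m+2), h =>
    rw [show m+2+1 = (m+1)+2 by ring, musterF]
    have h1 : (m+1+2)/2 - 1 = (m+2)/2 := by omega
    have h2 : ((m+1+2) % 2 == 0) = true := by simp; omega
    rw [h1, h2]; simp

lemma muster_step (n : Nat) :
    musterStepA ((List.range n).map musterF, musterF n) (n : Int) =
      ((List.range (n+1)).map musterF, musterF (n+1)) := by
  have hres : (List.range n).map musterF ++ [musterF n] = (List.range (n+1)).map musterF := by
    simp [List.range_succ]
  have hmod : PySem.Int.mod (n : Int) 2 = ((n % 2 : Nat) : Int) := by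
    exact_mod_cast PySem.Int.mod_natCast n 2
  have hfd : PySem.Int.floordiv (n : Int) 2 = ((n / 2 : Nat) : Int) := by
    exact_mod_cast PySem.Int.floordiv_natCast n 2
  unfold musterStepA
  simp only [hmod, hfd, hres]
  rcases Nat.even_or_odd n with he | ho
  · have h0 : n % 2 = 0 := Nat.even_iff.mp he
    have : (((n % 2 : Nat) : Int) == 1) = false := by simp [h0]
    rw [this]
    simp [musterF_succ_even n h0]
  · have h1 : n % 2 = 1 := Nat.odd_iff.mp ho
    have : (((n % 2 : Nat) : Int) == 1) = true := by simp [h1]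
    rw [this]
    have hget : PySem.List.pyGetD ((List.range (n+1)).map musterF) ((n / 2 : Nat) : Int) 0
        = musterF (n / 2) := by
      rw [PySem.List.pyGetD_eq_getElem _ 0 (by omega) (by simp; omega)]
      simp only [Int.toNat_natCast]
      simp
    simp only [hget]
    simp [musterF_succ_odd n h1]

lemma muster_loop (n : Nat) :
    (PySem.List.pyRange 0 (n : Int) 1).foldl musterStepA ([], 0) =
      ((List.range n).map musterF, musterF n) := by
  induction n with
  | zero => simp [musterF]
  | succ n ih =>
    have hsplit : PySem.List.pyRange 0 ((n+1 : Nat) : Int) 1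
        = PySem.List.pyRange 0 (n : Int) 1 ++ [(n : Int)] := by
      push_cast
      exact PySem.List.pyRange_one_succ_right (by positivity)
    rw [hsplit, List.foldl_append, ih]
    simp only [List.foldl_cons, List.foldl_nil, muster_step n]

-- ===== VERDICT (by name: the statement is the Claim_ definition above) =====
theorem muster_generator_spec : Claim_equal_muster_generator := by
  intro anzahl _
  show muster_generator anzahl = muster_generator_alt anzahl
  by_cases h : anzahl ≤ 0
  · simp [muster_generator, muster_generator_alt, PySem.List.pyRange_one_eq_nil h, h]
  · push Not at h
    obtain ⟨m, hm⟩ : ∃ m : Nat, anzahl = ((m+1 : Nat) : Int) := by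
      refine ⟨(anzahl - 1).toNat, by omega⟩
    subst hm
    rw [muster_generator, muster_loop (m+1)]
    have hne : (List.range (m+1)).map musterF ≠ [] := by simp
    rw [muster_generator_alt]
    simp only [hne, PySem.List.pyGet?_neg_one]
    rw [List.range_succ]
    simp only [List.map_append, List.map_cons, List.map_nil, List.getLast?_concat]
    have h2 : (((m+1 : Nat) : Int) - 1).toNat = m := by omega
    have h3 : ¬ ((m+1 : Nat) : Int) ≤ 0 := by omega
    rw [h2, if_neg h3]
    simp
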